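-- pv_equiv track=rewrite | github.com/adwait-thattey/Study | Competitive Coding/Codechef/Jan 2018 Long/STRMRG.py | calc
-- ===== SOURCE A (Python) =====
-- def calc(s1,s2,cur,count):
--
--
-- 	while len(s1)>0 and s1[0]==cur: s1 = s1[1:]
-- 	while len(s2)>0 and s2[0]==cur: s2 = s2[1:]
--
-- 	if len(s1)<=0 and len(s2)<=0 : return count
--
--
--
-- 	elif len(s1)>1 and len(s2)>1:
-- 		if s1[0]==s2[0] :
-- 			return calc(s1[1:],s2,s1[0],1)
-- 		if s1[0]==s2[1] and s1[1]==s2[0]: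
-- 			return calc(s1[1:],s2,s1[0],1)
--
--
-- 	if len(s2)<=0: return calc(s1[1:],"",s1[0],count+1)
-- 	elif len(s1)<=0 : return calc("",s2[1:],s2[0],count+1)
-- 	else : return min(calc(s1[1:],s2,s1[0],count+1) , calc(s1,s2[1:],s2[0],count+1) )
-- ===== SOURCE B (Python) =====
-- def calc(s1, s2, cur, count):
--     # Memoized DP over (index-into-s1, index-into-s2, cur, count) states
--     # instead of A's naive recursion over string slices.
--     n, m = len(s1), len(s2)
--     memo = {}
--
--     def go(i, j, cur, count):
--         if i < n and s1[i] == cur: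
--             return go(i + 1, j, cur, count)
--         if j < m and s2[j] == cur:
--             return go(i, j + 1, cur, count)
--         key = (i, j, cur, count)
--         if key in memo:
--             return memo[key]
--         if i >= n and j >= m:
--             res = count
--         else:
--             res = None
--             if n - i > 1 and m - j > 1:
--                 if s1[i] == s2[j] or (s1[i] == s2[j + 1] and s1[i + 1] == s2[j]):
--                     res = go(i + 1, j, s1[i], 1)
--             if res is None:
--                 if j >= m:
--                     res = go(i + 1, j, s1[i], count + 1)
--                 elif i >= n:
--                     res = go(i, j + 1, s2[j], count + 1)
--                 else:
--                     res = min(go(i + 1, j, s1[i], count + 1),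
--                               go(i, j + 1, s2[j], count + 1))
--         memo[key] = res
--         return res
--
--     return go(0, 0, cur, count)
-- ===== Notes on version B (the rewrite author's own statement) =====
-- stated objective: faster
-- what changed: Replaced A's naive exponential recursion over string slices by a memoized DP over (i, j, cur, count) index states, so each state is solved once and no slices are copied.
import Mathlib
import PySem

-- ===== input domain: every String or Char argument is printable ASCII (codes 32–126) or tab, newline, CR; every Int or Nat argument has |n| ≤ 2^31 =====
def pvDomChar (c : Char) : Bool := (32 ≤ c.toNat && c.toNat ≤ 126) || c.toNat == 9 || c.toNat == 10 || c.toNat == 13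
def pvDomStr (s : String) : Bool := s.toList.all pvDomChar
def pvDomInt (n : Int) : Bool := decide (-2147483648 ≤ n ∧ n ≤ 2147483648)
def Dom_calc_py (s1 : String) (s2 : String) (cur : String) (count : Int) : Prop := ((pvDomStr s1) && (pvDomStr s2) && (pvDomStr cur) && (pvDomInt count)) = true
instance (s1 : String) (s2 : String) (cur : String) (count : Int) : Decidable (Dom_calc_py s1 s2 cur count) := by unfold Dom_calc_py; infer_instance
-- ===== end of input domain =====

-- B replaces A's exponential recursion over string slices by a memoized DP over
-- (i, j, cur, count) index states (each state solved once, no slice copies).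

-- ===== PORT A =====
-- A works on Python strings by slicing; we port the strings through their character
-- lists (String.toList), where s[1:] is .tail — exact for every string.

-- the while loop 'while len(s1)>0 and s1[0]==cur: s1 = s1[1:]'
def stripA (l : List Char) (cur : String) : List Char :=
  match l with
  | [] => []
  | c :: t => if String.singleton c = cur then stripA t cur else c :: t

theorem stripA_length_le (l : List Char) (cur : String) : (stripA l cur).length ≤ l.length := by
  induction l with
  | nil => exact Nat.le_refl 0
  | cons c t ih =>
    show (if String.singleton c = cur then stripA t cur else c :: t).length ≤ t.length + 1
    by_cases h : String.singleton c = cur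
    · rw [if_pos h]; exact Nat.le_trans ih (Nat.le_succ _)
    · rw [if_neg h]; exact Nat.le_refl _

-- tiny named termination lemmas (cited from decreasing_by by name)
theorem decA_left {l1 l2 t2 : List Char} {cur : String} {a : Char} {r1 : List Char}
    (h1 : stripA l1 cur = a :: r1) (h2 : stripA l2 cur = t2) :
    r1.length + t2.length < l1.length + l2.length := by
  have hA := stripA_length_le l1 cur
  have hB := stripA_length_le l2 cur
  rw [h1] at hA; rw [h2] at hB
  exact Nat.lt_of_lt_of_le (Nat.add_lt_add_right (Nat.lt_succ_self _) _) (Nat.add_le_add hA hB)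

theorem decA_right {l1 l2 t1 : List Char} {cur : String} {c : Char} {r2 : List Char}
    (h1 : stripA l1 cur = t1) (h2 : stripA l2 cur = c :: r2) :
    t1.length + r2.length < l1.length + l2.length := by
  have hA := stripA_length_le l1 cur
  have hB := stripA_length_le l2 cur
  rw [h1] at hA; rw [h2] at hB
  exact Nat.lt_of_lt_of_le (Nat.add_lt_add_left (Nat.lt_succ_self _) _) (Nat.add_le_add hA hB)

-- A's recursion; the length tests (len<=0, len>1) become the disjoint list-shape cases
def calcACore (l1 l2 : List Char) (cur : String) (count : Int) : Int :=
  match h1 : stripA l1 cur, h2 : stripA l2 cur with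
  | [], [] => count
  | a :: r1, [] => calcACore r1 [] (String.singleton a) (count + 1)
  | [], c :: r2 => calcACore [] r2 (String.singleton c) (count + 1)
  | [a], c :: r2 =>
      min (calcACore [] (c :: r2) (String.singleton a) (count + 1))
          (calcACore [a] r2 (String.singleton c) (count + 1))
  | a :: b :: r1, [c] =>
      min (calcACore (b :: r1) [c] (String.singleton a) (count + 1))
          (calcACore (a :: b :: r1) [] (String.singleton c) (count + 1))
  | a :: b :: r1, c :: d :: r2 =>
      if a = c then calcACore (b :: r1) (c :: d :: r2) (String.singleton a) 1
      else if a = d ∧ b = c then calcACore (b :: r1) (c :: d :: r2) (String.singleton a) 1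
      else min (calcACore (b :: r1) (c :: d :: r2) (String.singleton a) (count + 1))
               (calcACore (a :: b :: r1) (d :: r2) (String.singleton c) (count + 1))
termination_by l1.length + l2.length
decreasing_by
  all_goals first
  | exact decA_left h1 h2
  | exact decA_right h1 h2

def calc_py (s1 : String) (s2 : String) (cur : String) (count : Int) : Int :=
  calcACore s1.toList s2.toList cur count

-- ===== PORT B =====
-- Python s[i] with 0 ≤ i < len(s): getD with a dummy default, exact on that range
def chAt (l : List Char) (i : Nat) : Char := l.getD i (Char.ofNat 0)

-- Source B's 'memo[key] = res; return res'
def storeB (key : Nat × Nat × String × Int) (r : Int × PySem.Dict (Nat × Nat × String × Int) Int) :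
    Int × PySem.Dict (Nat × Nat × String × Int) Int :=
  (r.1, r.2.insert key r.1)

-- tiny named termination lemmas (cited from decreasing_by by name)
theorem decB_left {n m i j : Nat} (h : i < n) :
    n - (i + 1) + (m - j) < n - i + (m - j) :=
  Nat.add_lt_add_right (Nat.sub_succ_lt_self n i h) (m - j)

theorem decB_right {n m i j : Nat} (h : j < m) :
    n - i + (m - (j + 1)) < n - i + (m - j) :=
  Nat.add_lt_add_left (Nat.sub_succ_lt_self m j h) (n - i)

theorem decB_sub {n m i j : Nat} (h : 1 < n - i) :
    n - (i + 1) + (m - j) < n - i + (m - j) :=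
  decB_left (Nat.lt_of_sub_pos (Nat.lt_trans Nat.zero_lt_one h))

theorem decB_endl {n m i j : Nat} (hend : ¬(n ≤ i ∧ m ≤ j)) (hj : m ≤ j) :
    n - (i + 1) + (m - j) < n - i + (m - j) :=
  decB_left (Nat.lt_of_not_le (fun h => hend ⟨h, hj⟩))

theorem decB_notl {n m i j : Nat} (hi : ¬n ≤ i) :
    n - (i + 1) + (m - j) < n - i + (m - j) :=
  decB_left (Nat.lt_of_not_le hi)

theorem decB_notr {n m i j : Nat} (hj : ¬m ≤ j) :
    n - i + (m - (j + 1)) < n - i + (m - j) :=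
  decB_right (Nat.lt_of_not_le hj)

-- Source B's inner 'go': the memo dict is threaded through explicitly
def goB (c1 c2 : List Char) (n m : Nat) (i j : Nat) (cur : String) (count : Int)
    (memo : PySem.Dict (Nat × Nat × String × Int) Int) :
    Int × PySem.Dict (Nat × Nat × String × Int) Int :=
  if _h1 : i < n ∧ String.singleton (chAt c1 i) = cur then
    goB c1 c2 n m (i + 1) j cur count memo
  else if _h2 : j < m ∧ String.singleton (chAt c2 j) = cur then
    goB c1 c2 n m i (j + 1) cur count memo
  else
    match memo.get? (i, j, cur, count) with
    | some v => (v, memo)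
    | none =>
      storeB (i, j, cur, count) <|
        if _hend : n ≤ i ∧ m ≤ j then (count, memo)
        else if _hg : 1 < n - i ∧ 1 < m - j ∧
            (chAt c1 i = chAt c2 j ∨ (chAt c1 i = chAt c2 (j + 1) ∧ chAt c1 (i + 1) = chAt c2 j)) then
          goB c1 c2 n m (i + 1) j (String.singleton (chAt c1 i)) 1 memo
        else if _hj : m ≤ j then
          goB c1 c2 n m (i + 1) j (String.singleton (chAt c1 i)) (count + 1) memo
        else if _hi : n ≤ i then
          goB c1 c2 n m i (j + 1) (String.singleton (chAt c2 j)) (count + 1) memo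
        else
          -- res = min(go(i+1, j, ...), go(i, j+1, ...)) with the memo threaded left to right
          let p1 := goB c1 c2 n m (i + 1) j (String.singleton (chAt c1 i)) (count + 1) memo
          let p2 := goB c1 c2 n m i (j + 1) (String.singleton (chAt c2 j)) (count + 1) p1.2
          (min p1.1 p2.1, p2.2)
termination_by (n - i) + (m - j)
decreasing_by
  · exact decB_left _h1.1
  · exact decB_right _h2.1
  · exact decB_sub _hg.1
  · exact decB_endl _hend _hj
  · exact decB_notr _hj
  · exact decB_notl _hi
  · exact decB_notr _hj

def calc_py_alt (s1 : String) (s2 : String) (cur : String) (count : Int) : Int :=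
  (goB s1.toList s2.toList s1.toList.length s2.toList.length 0 0 cur count PySem.Dict.empty).1

-- ===== PRECONDITION & SPEC =====
def Spec_calc_py (s1 : String) (s2 : String) (cur : String) (count : Int) (out : Int) : Prop := out = calc_py_alt s1 s2 cur count
instance (s1 : String) (s2 : String) (cur : String) (count : Int) (out : Int) : Decidable (Spec_calc_py s1 s2 cur count out) := by unfold Spec_calc_py; infer_instance

-- ===== CLAIM (what is proved, stated in full; the proofs are below) =====
def Claim_equal_calc_py : Prop := ∀ (s1 : String) (s2 : String) (cur : String) (count : Int), Dom_calc_py s1 s2 cur count → Spec_calc_py s1 s2 cur count (calc_py s1 s2 cur count)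

-- ===== LEMMAS AND PROOFS =====

theorem stripA_idem (l : List Char) (cur : String) : stripA (stripA l cur) cur = stripA l cur := by
  induction l with
  | nil => simp [stripA]
  | cons c t ih =>
    simp only [stripA]
    split
    · exact ih
    · simp only [stripA]; rw [if_neg]; assumption

theorem calcACore_strip (l1 l2 : List Char) (cur : String) (count : Int) :
    calcACore (stripA l1 cur) (stripA l2 cur) cur count = calcACore l1 l2 cur count := by
  rw [calcACore, calcACore]
  rw [stripA_idem, stripA_idem]

theorem chAt_eq (s : List Char) (i : Nat) (h : i < s.length) : chAt s i = s[i] := by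
  simp [chAt, List.getD, List.getElem?_eq_getElem h]

theorem drop_cons (s : List Char) (i : Nat) (h : i < s.length) :
    s.drop i = chAt s i :: s.drop (i + 1) := by
  rw [chAt_eq s i h]; exact (List.getElem_cons_drop h).symm

-- a position the strip loop has stopped at is stripA-stable
theorem stripA_drop_stable (s : List Char) (cur : String) (i : Nat)
    (h : ¬(i < s.length ∧ String.singleton (chAt s i) = cur)) :
    stripA (s.drop i) cur = s.drop i := by
  by_cases hlt : i < s.length
  · rw [drop_cons s i hlt]
    simp only [stripA]
    rw [if_neg (fun hc => h ⟨hlt, hc⟩)]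
  · rw [List.drop_eq_nil_of_le (by omega)]; simp [stripA]

-- dropping a character the strip loop would remove does not change A's value
theorem calcACore_strip_left (l1 l2 : List Char) (a : Char) (cur : String) (count : Int)
    (h : String.singleton a = cur) :
    calcACore (a :: l1) l2 cur count = calcACore l1 l2 cur count := by
  rw [← calcACore_strip (a :: l1) l2 cur count, ← calcACore_strip l1 l2 cur count]
  congr 1
  simp only [stripA]; rw [if_pos h]

theorem calcACore_strip_right (l1 l2 : List Char) (c : Char) (cur : String) (count : Int)
    (h : String.singleton c = cur) :
    calcACore l1 (c :: l2) cur count = calcACore l1 l2 cur count := by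
  rw [← calcACore_strip l1 (c :: l2) cur count, ← calcACore_strip l1 l2 cur count]
  congr 1
  simp only [stripA]; rw [if_pos h]

-- arm-by-arm reduction lemmas for calcACore
theorem calcA_nil_nil (l1 l2 : List Char) (cur : String) (count : Int)
    (h1 : stripA l1 cur = []) (h2 : stripA l2 cur = []) :
    calcACore l1 l2 cur count = count := by
  rw [calcACore.eq_def]; split <;> simp_all

theorem calcA_cons_nil (l1 l2 : List Char) (a : Char) (r1 : List Char) (cur : String) (count : Int)
    (h1 : stripA l1 cur = a :: r1) (h2 : stripA l2 cur = []) :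
    calcACore l1 l2 cur count = calcACore r1 [] (String.singleton a) (count + 1) := by
  rw [calcACore.eq_def]; split <;> simp_all

theorem calcA_nil_cons (l1 l2 : List Char) (c : Char) (r2 : List Char) (cur : String) (count : Int)
    (h1 : stripA l1 cur = []) (h2 : stripA l2 cur = c :: r2) :
    calcACore l1 l2 cur count = calcACore [] r2 (String.singleton c) (count + 1) := by
  rw [calcACore.eq_def]; split <;> simp_all

theorem calcA_one_cons (l1 l2 : List Char) (a c : Char) (r2 : List Char) (cur : String) (count : Int)
    (h1 : stripA l1 cur = [a]) (h2 : stripA l2 cur = c :: r2) :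
    calcACore l1 l2 cur count =
      min (calcACore [] (c :: r2) (String.singleton a) (count + 1))
          (calcACore [a] r2 (String.singleton c) (count + 1)) := by
  rw [calcACore.eq_def]; split <;> simp_all

theorem calcA_two_one (l1 l2 : List Char) (a b c : Char) (r1 : List Char) (cur : String) (count : Int)
    (h1 : stripA l1 cur = a :: b :: r1) (h2 : stripA l2 cur = [c]) :
    calcACore l1 l2 cur count =
      min (calcACore (b :: r1) [c] (String.singleton a) (count + 1))
          (calcACore (a :: b :: r1) [] (String.singleton c) (count + 1)) := by
  rw [calcACore.eq_def]; split <;> simp_all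

theorem calcA_two_two (l1 l2 : List Char) (a b c d : Char) (r1 r2 : List Char) (cur : String) (count : Int)
    (h1 : stripA l1 cur = a :: b :: r1) (h2 : stripA l2 cur = c :: d :: r2) :
    calcACore l1 l2 cur count =
      if a = c then calcACore (b :: r1) (c :: d :: r2) (String.singleton a) 1
      else if a = d ∧ b = c then calcACore (b :: r1) (c :: d :: r2) (String.singleton a) 1
      else min (calcACore (b :: r1) (c :: d :: r2) (String.singleton a) (count + 1))
               (calcACore (a :: b :: r1) (d :: r2) (String.singleton c) (count + 1)) := by
  rw [calcACore.eq_def]; split <;> simp_all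

-- the memo invariant: every stored value is the (A-side) answer of its state
def MemoInv (c1 c2 : List Char) (memo : PySem.Dict (Nat × Nat × String × Int) Int) : Prop :=
  ∀ i j cur cnt v, memo.get? (i, j, cur, cnt) = some v →
    v = calcACore (c1.drop i) (c2.drop j) cur cnt

theorem storeB_correct (c1 c2 : List Char) (i j : Nat) (cur : String) (count : Int)
    (r : Int × PySem.Dict (Nat × Nat × String × Int) Int)
    (h1 : r.1 = calcACore (c1.drop i) (c2.drop j) cur count)
    (h2 : MemoInv c1 c2 r.2) :
    (storeB (i, j, cur, count) r).1 = calcACore (c1.drop i) (c2.drop j) cur count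
      ∧ MemoInv c1 c2 (storeB (i, j, cur, count) r).2 := by
  refine ⟨h1, ?_⟩
  intro a b c k v hv
  simp only [storeB] at hv
  rw [PySem.Dict.get?_insert] at hv
  split at hv
  · rename_i hk
    simp only [Prod.mk.injEq] at hk
    obtain ⟨ha, hb, hc, hk⟩ := hk
    subst ha; subst hb; subst hc; subst hk
    cases hv; exact h1
  · exact h2 a b c k v hv

theorem goB_correct (c1 c2 : List Char) :
    ∀ (i j : Nat) (cur : String) (count : Int) memo, i ≤ c1.length → j ≤ c2.length →
      MemoInv c1 c2 memo →
      (goB c1 c2 c1.length c2.length i j cur count memo).1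
          = calcACore (c1.drop i) (c2.drop j) cur count
      ∧ MemoInv c1 c2 (goB c1 c2 c1.length c2.length i j cur count memo).2 := by
  intro i j cur count memo
  fun_induction goB c1 c2 c1.length c2.length i j cur count memo with
  | case1 i j cur count memo h ih =>
    intro hi hj hInv
    obtain ⟨hlt, hcur⟩ := h
    rw [drop_cons c1 i hlt, calcACore_strip_left _ _ _ _ _ hcur]
    exact ih (by omega) hj hInv
  | case2 i j cur count memo h1 h ih =>
    intro hi hj hInv
    obtain ⟨hlt, hcur⟩ := h
    rw [drop_cons c2 j hlt, calcACore_strip_right _ _ _ _ _ hcur]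
    exact ih hi (by omega) hInv
  | case3 i j cur count memo h1 h2 v hget =>
    intro hi hj hInv
    exact ⟨hInv _ _ _ _ _ hget, hInv⟩
  | case4 i j cur count memo hs1 hs2 hget ih5 ih4 ih3 ih2 ih1 =>
    intro hi hj hInv
    have hst1 : stripA (c1.drop i) cur = c1.drop i := stripA_drop_stable c1 cur i hs1
    have hst2 : stripA (c2.drop j) cur = c2.drop j := stripA_drop_stable c2 cur j hs2
    split_ifs with hend hg hj2 hi2
    · -- both sides exhausted
      refine storeB_correct _ _ _ _ _ _ _ ?_ hInv
      rw [calcA_nil_nil _ _ _ _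
        (by rw [hst1, List.drop_eq_nil_of_le hend.1])
        (by rw [hst2, List.drop_eq_nil_of_le hend.2])]
    · -- the matching-heads branch (count reset to 1)
      have hi1 : i < c1.length := by omega
      have hj1 : j < c2.length := by omega
      have f1 : c1.drop (i + 1) = chAt c1 (i + 1) :: c1.drop (i + 1 + 1) :=
        drop_cons c1 (i + 1) (by omega)
      have d1 : c1.drop i = chAt c1 i :: chAt c1 (i + 1) :: c1.drop (i + 1 + 1) := by
        rw [drop_cons c1 i hi1, f1]
      have d2 : c2.drop j = chAt c2 j :: chAt c2 (j + 1) :: c2.drop (j + 1 + 1) := by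
        rw [drop_cons c2 j hj1, drop_cons c2 (j + 1) (by omega)]
      obtain ⟨hp1, hm1⟩ := ih5 hg (by omega) hj hInv
      refine storeB_correct _ _ _ _ _ _ _ ?_ hm1
      rw [hp1]
      rw [calcA_two_two (c1.drop i) (c2.drop j) _ _ _ _ _ _ cur count
        (by rw [hst1]; exact d1) (by rw [hst2]; exact d2)]
      obtain ⟨-, -, hcc⟩ := hg
      by_cases hac : chAt c1 i = chAt c2 j
      · rw [if_pos hac, f1, d2]
      · rcases hcc with h | h
        · exact absurd h hac
        · rw [if_neg hac, if_pos h, f1, d2]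
    · -- s2 exhausted
      have hi1 : i < c1.length := by omega
      obtain ⟨hp1, hm1⟩ := ih4 hend hj2 (by omega) hj hInv
      refine storeB_correct _ _ _ _ _ _ _ ?_ hm1
      rw [hp1, calcA_cons_nil (c1.drop i) (c2.drop j) (chAt c1 i) (c1.drop (i + 1)) cur count
        (by rw [hst1]; exact drop_cons c1 i hi1)
        (by rw [hst2, List.drop_eq_nil_of_le hj2]),
        List.drop_eq_nil_of_le hj2]
    · -- s1 exhausted
      have hj1 : j < c2.length := by omega
      obtain ⟨hp2, hm2⟩ := ih3 hj2 hi (by omega) hInv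
      refine storeB_correct _ _ _ _ _ _ _ ?_ hm2
      rw [hp2, calcA_nil_cons (c1.drop i) (c2.drop j) (chAt c2 j) (c2.drop (j + 1)) cur count
        (by rw [hst1, List.drop_eq_nil_of_le hi2])
        (by rw [hst2]; exact drop_cons c2 j hj1),
        List.drop_eq_nil_of_le hi2]
    · -- the min of the two drops
      have hi1 : i < c1.length := by omega
      have hj1 : j < c2.length := by omega
      obtain ⟨hp1, hm1⟩ := ih2 hi2 (by omega) hj hInv
      obtain ⟨hp2, hm2⟩ := ih1 hj2 hi (by omega) hm1
      refine storeB_correct _ _ _ _ _ _ _ ?_ hm2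
      show min _ _ = _
      rw [hp1, hp2]
      by_cases hn2 : 1 < c1.length - i
      · have f1 : c1.drop (i + 1) = chAt c1 (i + 1) :: c1.drop (i + 1 + 1) :=
          drop_cons c1 (i + 1) (by omega)
        have d1 : c1.drop i = chAt c1 i :: chAt c1 (i + 1) :: c1.drop (i + 1 + 1) := by
          rw [drop_cons c1 i hi1, f1]
        by_cases hm2' : 1 < c2.length - j
        · have f2 : c2.drop (j + 1) = chAt c2 (j + 1) :: c2.drop (j + 1 + 1) :=
            drop_cons c2 (j + 1) (by omega)
          have d2 : c2.drop j = chAt c2 j :: chAt c2 (j + 1) :: c2.drop (j + 1 + 1) := by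
            rw [drop_cons c2 j hj1, f2]
          have hor : ¬(chAt c1 i = chAt c2 j ∨
              (chAt c1 i = chAt c2 (j + 1) ∧ chAt c1 (i + 1) = chAt c2 j)) :=
            fun h => hg ⟨hn2, hm2', h⟩
          rw [calcA_two_two (c1.drop i) (c2.drop j) _ _ _ _ _ _ cur count
            (by rw [hst1]; exact d1) (by rw [hst2]; exact d2)]
          rw [if_neg (fun h => hor (Or.inl h)), if_neg (fun h => hor (Or.inr h))]
          rw [f1, d2, f2, d1]
        · -- len(s2) - j = 1
          have ej2 : c2.drop (j + 1) = [] := List.drop_eq_nil_of_le (by omega)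
          have d2' : c2.drop j = [chAt c2 j] := by rw [drop_cons c2 j hj1, ej2]
          rw [calcA_two_one (c1.drop i) (c2.drop j) (chAt c1 i) (chAt c1 (i + 1)) (chAt c2 j)
            (c1.drop (i + 1 + 1)) cur count (by rw [hst1]; exact d1) (by rw [hst2]; exact d2')]
          rw [f1, d1, d2', ej2]
      · -- len(s1) - i = 1
        have ei2 : c1.drop (i + 1) = [] := List.drop_eq_nil_of_le (by omega)
        have d1' : c1.drop i = [chAt c1 i] := by rw [drop_cons c1 i hi1, ei2]
        rw [calcA_one_cons (c1.drop i) (c2.drop j) (chAt c1 i) (chAt c2 j)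
          (c2.drop (j + 1)) cur count (by rw [hst1]; exact d1')
          (by rw [hst2]; exact drop_cons c2 j hj1)]
        rw [ei2, d1', drop_cons c2 j hj1]

-- ===== VERDICT (by name: the statement is the Claim_ definition above) =====
theorem calc_py_spec : Claim_equal_calc_py := by
  intro s1 s2 cur count _
  unfold Spec_calc_py calc_py calc_py_alt
  have h := goB_correct s1.toList s2.toList 0 0 cur count PySem.Dict.empty
    (by omega) (by omega)
    (by intro i j c k v hv; simp [PySem.Dict.get?_empty] at hv)
  simpa using h.1.symm
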